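-- pv_equiv track=rewrite | github.com/sankalp0709/News-AI- | unified_tools_backend/main.py | extract_five_ws
-- ===== SOURCE A (Python) =====
-- from typing import List, Optional, Dict, Any
--
-- def extract_five_ws(content: str, title: str) -> Dict[str, str]:
--     """Extract Who, What, When, Where, Why from news content"""
--     five_ws = {
--         "who": "",
--         "what": "",
--         "when": "",
--         "where": "",
--         "why": ""
--     }
--
--     # Simple extraction based on patterns
--     sentences = content.split('.')[:10]  # First 10 sentences
--
--     for sentence in sentences:
--         sentence_lower = sentence.lower()
--
--         # Who - look for names, titles, organizations
--         if not five_ws["who"] and any(word in sentence_lower for word in ['said', 'announced', 'reported', 'according to']):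
--             five_ws["who"] = sentence.strip()
--
--         # What - often in the title or first sentence
--         if not five_ws["what"] and (sentence == sentences[0] or title):
--             five_ws["what"] = title if title else sentence.strip()
--
--         # When - look for time indicators
--         if not five_ws["when"] and any(word in sentence_lower for word in ['today', 'yesterday', 'monday', 'tuesday', 'january', 'february']):
--             five_ws["when"] = sentence.strip()
--
--         # Where - look for location indicators
--         if not five_ws["where"] and any(word in sentence_lower for word in ['in', 'at', 'from', 'city', 'state', 'country']):
--             five_ws["where"] = sentence.strip()
--
--         # Why - look for reason indicators
--         if not five_ws["why"] and any(word in sentence_lower for word in ['because', 'due to', 'as a result', 'caused by']):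
--             five_ws["why"] = sentence.strip()
--
--     return five_ws
-- ===== SOURCE B (Python) =====
-- def extract_five_ws(content: str, title: str) -> dict:
--     """Extract Who, What, When, Where, Why from news content"""
--     sentences = content.split('.')[:10]
--
--     def first_match(words):
--         for s in sentences:
--             low = s.lower()
--             if any(w in low for w in words):
--                 return s.strip()
--         return ""
--
--     return {
--         "who": first_match(['said', 'announced', 'reported', 'according to']),
--         "what": title if title else sentences[0].strip(),
--         "when": first_match(['today', 'yesterday', 'monday', 'tuesday', 'january', 'february']),
--         "where": first_match(['in', 'at', 'from', 'city', 'state', 'country']),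
--         "why": first_match(['because', 'due to', 'as a result', 'caused by']),
--     }
-- ===== Notes on version B (the rewrite author's own statement) =====
-- stated objective: simpler
-- what changed: Replaced the single loop that threads five set-once flags through every sentence by one first-matching-sentence helper called once per W, with a closed form (title if title else first sentence stripped) for 'what'.
import Mathlib
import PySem

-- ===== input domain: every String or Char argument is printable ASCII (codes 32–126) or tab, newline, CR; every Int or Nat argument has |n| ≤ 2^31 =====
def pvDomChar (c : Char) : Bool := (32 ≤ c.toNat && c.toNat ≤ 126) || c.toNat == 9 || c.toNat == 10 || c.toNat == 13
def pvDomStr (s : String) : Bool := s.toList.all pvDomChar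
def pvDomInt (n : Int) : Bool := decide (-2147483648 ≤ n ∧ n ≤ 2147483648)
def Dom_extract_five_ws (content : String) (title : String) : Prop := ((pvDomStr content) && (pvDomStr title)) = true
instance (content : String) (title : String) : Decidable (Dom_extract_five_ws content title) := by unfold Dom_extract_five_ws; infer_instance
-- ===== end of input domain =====

-- B replaces A's single five-flag loop by a first-matching-sentence helper called once per W
-- and a closed form for "what" (objective: simpler).

-- ===== PORT A =====
-- The Python dict with five fixed keys is ported as a 5-tuple of strings threaded through
-- the loop and rebuilt as the association list at the end; content.split('.') never returns
-- an empty list, so Python's sentences[0] is ported as sentences.headI.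
def extract_five_ws (content : String) (title : String) : List (String × String) :=
  let sentences := ((PySem.Str.split? content ".").getD []).take 10
  let st :=
    sentences.foldl (fun st s =>
      ( if st.1 == "" && (["said", "announced", "reported", "according to"].any
            (fun w => PySem.Str.isIn w (PySem.Str.lower s))) then PySem.Str.strip s else st.1,
        if st.2.1 == "" && (s == sentences.headI || !(title == "")) then
          (if title == "" then PySem.Str.strip s else title) else st.2.1,
        if st.2.2.1 == "" && (["today", "yesterday", "monday", "tuesday", "january", "february"].any
            (fun w => PySem.Str.isIn w (PySem.Str.lower s))) then PySem.Str.strip s else st.2.2.1,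
        if st.2.2.2.1 == "" && (["in", "at", "from", "city", "state", "country"].any
            (fun w => PySem.Str.isIn w (PySem.Str.lower s))) then PySem.Str.strip s else st.2.2.2.1,
        if st.2.2.2.2 == "" && (["because", "due to", "as a result", "caused by"].any
            (fun w => PySem.Str.isIn w (PySem.Str.lower s))) then PySem.Str.strip s else st.2.2.2.2 ))
      ("", "", "", "", "")
  [("who", st.1), ("what", st.2.1), ("when", st.2.2.1), ("where", st.2.2.2.1), ("why", st.2.2.2.2)]

-- ===== PORT B =====
def firstMatch (sentences : List String) (words : List String) : String :=
  match sentences with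
  | [] => ""
  | s :: rest =>
    if words.any (fun w => PySem.Str.isIn w (PySem.Str.lower s)) then PySem.Str.strip s
    else firstMatch rest words

def extract_five_ws_alt (content : String) (title : String) : List (String × String) :=
  let sentences := ((PySem.Str.split? content ".").getD []).take 10
  [("who", firstMatch sentences ["said", "announced", "reported", "according to"]),
   ("what", if title == "" then PySem.Str.strip sentences.headI else title),
   ("when", firstMatch sentences ["today", "yesterday", "monday", "tuesday", "january", "february"]),
   ("where", firstMatch sentences ["in", "at", "from", "city", "state", "country"]),
   ("why", firstMatch sentences ["because", "due to", "as a result", "caused by"])]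

-- ===== PRECONDITION & SPEC =====
def Spec_extract_five_ws (content : String) (title : String) (out : List (String × String)) : Prop := out = extract_five_ws_alt content title
instance (content : String) (title : String) (out : List (String × String)) : Decidable (Spec_extract_five_ws content title out) := by unfold Spec_extract_five_ws; infer_instance

-- ===== CLAIM (what is proved, stated in full; the proofs are below) =====
def Claim_equal_extract_five_ws : Prop := ∀ (content : String) (title : String), Dom_extract_five_ws content title → Spec_extract_five_ws content title (extract_five_ws content title)

-- ===== LEMMAS AND PROOFS =====

-- Python's str.split always returns at least one piece
theorem splitOn_go_ne_nil (sep : List Char) (fuel : Nat) (l cur : List Char) (acc : List (List Char)) :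
    PySem.Chars.splitOn.go sep fuel l cur acc ≠ [] := by
  induction fuel generalizing l cur acc with
  | zero => simp [PySem.Chars.splitOn.go]
  | succ fuel ih =>
    cases l with
    | nil => simp [PySem.Chars.splitOn.go]
    | cons c rest =>
      rw [PySem.Chars.splitOn.go]
      split
      · exact ih _ _ _
      · exact ih _ _ _

theorem sentences_ne_nil (content : String) :
    ((PySem.Str.split? content ".").getD []).take 10 ≠ [] := by
  cases hs : PySem.Str.split? content "." with
  | none =>
    exfalso
    have h := PySem.Str.split?_map content "."
    rw [hs] at h
    simp [PySem.Chars.split?] at h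
  | some l =>
    have h := PySem.Str.split?_map content "."
    rw [hs] at h
    simp only [PySem.Chars.split?, Option.map_some, String.toList] at h
    intro htake
    rw [List.take_eq_nil_iff] at htake
    rcases htake with h10 | hl
    · omega
    · subst hl
      simp only [List.map_nil] at h
      rw [if_neg (by decide)] at h
      injection h with h
      exact splitOn_go_ne_nil _ _ _ _ _ h.symm

-- a foldl whose step fixes the accumulator is constant
theorem foldl_fix {f : String → String → String} {a : String}
    (hf : ∀ s, f a s = a) (l : List String) : l.foldl f a = a := by
  induction l with
  | nil => rfl
  | cons s rest ih => rw [List.foldl_cons, hf s, ih]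

-- A's "set once on first keyword match" loop component equals B's firstMatch,
-- provided a matching sentence never strips to the empty string
theorem foldl_first (words : List String)
    (hw : ∀ s : String, words.any (fun w => PySem.Str.isIn w (PySem.Str.lower s)) = true →
      PySem.Str.strip s ≠ "")
    (l : List String) :
    l.foldl (fun a s => if a == "" && words.any (fun w => PySem.Str.isIn w (PySem.Str.lower s))
        then PySem.Str.strip s else a) "" = firstMatch l words := by
  induction l with
  | nil => rfl
  | cons s rest ih =>
    rw [List.foldl_cons, firstMatch]
    cases hm : words.any (fun w => PySem.Str.isIn w (PySem.Str.lower s)) with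
    | false => simpa using ih
    | true =>
      simp only [BEq.rfl, Bool.true_and, if_true]
      apply foldl_fix
      intro s'
      have := hw s hm
      simp [this]

-- no whitespace character is an ASCII capital, so lower() fixes whitespace
theorem not_upper_of_space (d : Char) (h : PySem.Chars.isspace d = true) :
    PySem.Chars.lowerChar d = d := by
  rw [PySem.Chars.lowerChar]
  rw [if_neg]
  simp only [PySem.Chars.isspace, Bool.or_eq_true, Bool.and_eq_true, decide_eq_true_eq] at h
  simp only [PySem.Chars.isupper, Bool.and_eq_true, decide_eq_true_eq, Char.le_def,
    UInt32.le_iff_toNat_le, not_and]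
  simp only [Char.toNat, show 'A'.val.toNat = 65 from rfl, show 'Z'.val.toNat = 90 from rfl] at h ⊢
  omega

-- a sentence whose lowering contains a keyword with at least one non-whitespace
-- character does not strip to the empty string
theorem keyword_list_ok (words : List String)
    (hb : words.all (fun w => w.toList.any (fun c => !(PySem.Chars.isspace c))) = true) :
    ∀ w ∈ words, ∃ c ∈ w.toList, PySem.Chars.isspace c = false := by
  intro w hw
  have h := List.all_eq_true.mp hb w hw
  simpa using List.any_eq_true.mp h

theorem strip_ne_of_keyword (words : List String)
    (hwords : ∀ w ∈ words, ∃ c ∈ w.toList, PySem.Chars.isspace c = false)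
    (s : String)
    (h : words.any (fun w => PySem.Str.isIn w (PySem.Str.lower s)) = true) :
    PySem.Str.strip s ≠ "" := by
  rw [List.any_eq_true] at h
  obtain ⟨w, hwmem, hin⟩ := h
  rw [PySem.Str.isIn_eq] at hin
  have hinf : w.toList <:+: (PySem.Str.lower s).toList := by
    rw [PySem.Str.toList_lower]
    exact (PySem.Chars.isIn_iff_infix _ _).mp (by simpa using hin)
  rw [PySem.Str.toList_lower] at hinf
  obtain ⟨c, hc, hcns⟩ := hwords w hwmem
  have hcmem : c ∈ PySem.Chars.lower s.toList := hinf.subset hc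
  rw [PySem.Chars.lower] at hcmem
  obtain ⟨d, hd, hdc⟩ := List.mem_map.mp hcmem
  have hdns : PySem.Chars.isspace d = false := by
    cases hds : PySem.Chars.isspace d
    · rfl
    · exfalso
      rw [not_upper_of_space d hds] at hdc
      subst hdc
      rw [hds] at hcns
      exact absurd hcns (by simp)
  intro hstrip
  have hnil : (PySem.Str.strip s).toList = [] := by rw [hstrip]; rfl
  rw [PySem.Str.toList_strip, PySem.Chars.strip, PySem.Chars.rstrip] at hnil
  have hall : ∀ x ∈ PySem.Chars.lstrip s.toList, PySem.Chars.isspace x = true := by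
    intro x hx
    have hdw : List.dropWhile PySem.Chars.isspace (PySem.Chars.lstrip s.toList).reverse = [] := by
      simpa using hnil
    exact List.dropWhile_eq_nil_iff.mp hdw x (by simpa using hx)
  have hsplit := List.takeWhile_append_dropWhile (p := PySem.Chars.isspace) (l := s.toList)
  rw [← hsplit] at hd
  rcases List.mem_append.mp hd with h1 | h2
  · rw [List.mem_takeWhile_imp h1] at hdns; exact absurd hdns (by simp)
  · have := hall d (by rw [PySem.Chars.lstrip]; exact h2)
    rw [this] at hdns; exact absurd hdns (by simp)

theorem kw_who : ∀ s : String,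
    (["said", "announced", "reported", "according to"].any
      (fun w => PySem.Str.isIn w (PySem.Str.lower s))) = true → PySem.Str.strip s ≠ "" :=
  fun s => strip_ne_of_keyword _ (keyword_list_ok _ (by decide)) s

theorem kw_when : ∀ s : String,
    (["today", "yesterday", "monday", "tuesday", "january", "february"].any
      (fun w => PySem.Str.isIn w (PySem.Str.lower s))) = true → PySem.Str.strip s ≠ "" :=
  fun s => strip_ne_of_keyword _ (keyword_list_ok _ (by decide)) s

theorem kw_where : ∀ s : String,
    (["in", "at", "from", "city", "state", "country"].any
      (fun w => PySem.Str.isIn w (PySem.Str.lower s))) = true → PySem.Str.strip s ≠ "" :=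
  fun s => strip_ne_of_keyword _ (keyword_list_ok _ (by decide)) s

theorem kw_why : ∀ s : String,
    (["because", "due to", "as a result", "caused by"].any
      (fun w => PySem.Str.isIn w (PySem.Str.lower s))) = true → PySem.Str.strip s ≠ "" :=
  fun s => strip_ne_of_keyword _ (keyword_list_ok _ (by decide)) s

-- A's "what" loop over a nonempty sentence list computes B's closed form
theorem foldl_what (title h0 h : String) (t : List String) (hh : h0 = h) :
    (h :: t).foldl (fun a s => if a == "" && (s == h0 || !(title == ""))
        then (if title == "" then PySem.Str.strip s else title) else a) ""
      = (if title == "" then PySem.Str.strip h else title) := by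
  rw [hh]
  by_cases ht : title = ""
  · subst ht
    rw [List.foldl_cons]
    simp only [BEq.rfl, Bool.true_and, Bool.not_true, Bool.or_false, if_true]
    apply foldl_fix
    intro s
    by_cases hsh : s = h
    · subst hsh
      by_cases he : PySem.Str.strip s = "" <;> simp [he]
    · simp [hsh]
  · have htf : (title == "") = false := by
      cases hd : title == "" <;> simp_all
    rw [List.foldl_cons]
    simp only [BEq.rfl, Bool.true_and, htf, Bool.not_false, Bool.or_true, if_true]
    exact foldl_fix (fun s => by simp [htf]) t

-- componentwise split of the 5-tuple fold
theorem foldl_prod5 (f1 f2 f3 f4 f5 : String → String → String) (l : List String)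
    (a b c d e : String) :
    l.foldl (fun st s => (f1 st.1 s, f2 st.2.1 s, f3 st.2.2.1 s, f4 st.2.2.2.1 s, f5 st.2.2.2.2 s))
        (a, b, c, d, e)
      = (l.foldl f1 a, l.foldl f2 b, l.foldl f3 c, l.foldl f4 d, l.foldl f5 e) := by
  induction l generalizing a b c d e with
  | nil => rfl
  | cons x xs ih => simp [List.foldl, ih]

-- ===== VERDICT (by name: the statement is the Claim_ definition above) =====
theorem extract_five_ws_spec : Claim_equal_extract_five_ws := by
  intro content title _
  unfold Spec_extract_five_ws
  simp only [extract_five_ws, extract_five_ws_alt]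
  obtain ⟨h, t, hst⟩ := List.exists_cons_of_ne_nil (sentences_ne_nil content)
  rw [hst]
  rw [foldl_prod5
    (fun a s => if a == "" && (["said", "announced", "reported", "according to"].any
        (fun w => PySem.Str.isIn w (PySem.Str.lower s))) then PySem.Str.strip s else a)
    (fun a s => if a == "" && (s == (h :: t).headI || !(title == "")) then
        (if title == "" then PySem.Str.strip s else title) else a)
    (fun a s => if a == "" && (["today", "yesterday", "monday", "tuesday", "january", "february"].any
        (fun w => PySem.Str.isIn w (PySem.Str.lower s))) then PySem.Str.strip s else a)
    (fun a s => if a == "" && (["in", "at", "from", "city", "state", "country"].any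
        (fun w => PySem.Str.isIn w (PySem.Str.lower s))) then PySem.Str.strip s else a)
    (fun a s => if a == "" && (["because", "due to", "as a result", "caused by"].any
        (fun w => PySem.Str.isIn w (PySem.Str.lower s))) then PySem.Str.strip s else a)]
  rw [foldl_first _ kw_who, foldl_first _ kw_when, foldl_first _ kw_where, foldl_first _ kw_why,
    foldl_what title ((h :: t).headI) h t rfl]
  simp only [List.headI_cons]
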